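-- pv_equiv track=rewrite | github.com/manwar/perlweeklychallenge-club | challenge-371/sgreen/python/ch-2.py | subset_equilibrium
-- ===== SOURCE A (Python) =====
-- def subset_equilibrium(nums: list[int]) -> list[list[int]]:
--     """
--     Find all subsets where the sum of elements equals the sum of their indices.
--
--     Params:
--         nums (list): A list of integers
--
--     Returns:
--         list[list[int]]: A list of subsets that match the criteria
--     """
--     # Store the result list
--     results = []
--
--     for bits in range(1, 2**len(nums)-1):
--         # Compute these values for this subset of values
--         digit_sum = 0
--         pos_sum = 0
--         result = []
--         for pos, value in enumerate(nums):
--             # Use bitwise operator to determine if we should consider this value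
--             if 2 ** pos & bits:
--                 digit_sum += value
--                 pos_sum += pos + 1
--                 result.append(value)
--
--         if digit_sum == pos_sum and len(result) > 1:
--             # This matches the criteria
--             results.append(result)
--
--     return results
-- ===== SOURCE B (Python) =====
-- def subset_equilibrium(nums: list[int]) -> list[list[int]]:
--     # Recursive subset generation in ascending-bitmask order, carrying the
--     # running (element-sum minus index-sum) difference and the subset size,
--     # so each subset costs O(1) bookkeeping; subsets are materialised from
--     # shared cons-chains only for the matches.
--     def gen(pos, rest):
--         if not rest:
--             return [(None, 0, 0)]
--         x = rest[0]
--         w = x - (pos + 1)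
--         return [t for chain, d, k in gen(pos + 1, rest[1:])
--                 for t in ((chain, d, k), ((x, chain), d + w, k + 1))]
--
--     results = []
--     for chain, d, k in gen(0, nums):
--         if d == 0 and k > 1:
--             sub = []
--             while chain is not None:
--                 sub.append(chain[0])
--                 chain = chain[1]
--             results.append(sub)
--     return results
-- ===== Notes on version B (the rewrite author's own statement) =====
-- stated objective: faster
-- what changed: Replaces A's bitmask loop that rescans all n elements per mask (O(n*2^n)) with a recursive subset generator that emits subsets in the same ascending-bitmask order while carrying the running (sum - index-sum) difference and size at O(1) per subset, sharing subsets as cons-chains and materialising only the matches.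
-- intended difference: On lists of length > 1 whose elements sum to 1+2+...+n (so the full set itself qualifies), A omits the full list because its range(1, 2**n-1) stops one mask short of 2**n-1, while B includes it as the last result, which is the intended value for 'all subsets'. — e.g. on subset_equilibrium([1, 2]): A returns [], B returns [[1, 2]]
import Mathlib
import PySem

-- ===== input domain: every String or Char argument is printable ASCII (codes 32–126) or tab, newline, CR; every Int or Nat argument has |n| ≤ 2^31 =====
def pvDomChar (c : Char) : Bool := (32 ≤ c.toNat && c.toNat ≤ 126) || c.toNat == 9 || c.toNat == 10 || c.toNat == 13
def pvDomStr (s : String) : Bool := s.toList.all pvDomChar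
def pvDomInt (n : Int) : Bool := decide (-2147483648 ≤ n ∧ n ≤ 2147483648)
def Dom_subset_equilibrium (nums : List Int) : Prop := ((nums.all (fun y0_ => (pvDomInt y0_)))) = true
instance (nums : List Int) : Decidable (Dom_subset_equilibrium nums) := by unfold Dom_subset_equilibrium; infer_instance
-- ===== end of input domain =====

-- B replaces A's per-mask O(n) rescan by a recursive subset generator that carries the running
-- (sum − index-sum) difference and size, O(1) per mask; B also includes the full set where it
-- qualifies (A's range(1, 2**n-1) skips mask 2**n-1, an off-by-one), stated as D_ below.


-- ===== PORT A =====
-- inner `for pos, value in enumerate(nums)` loop of A, computing (digit_sum, pos_sum, result)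
-- for one bitmask `bits`; `pv.1.toNat` is exact: enumerate indices are ≥ 0.
def pvInnerA (nums : List Int) (bits : Int) : Int × Int × List Int :=
  (PySem.List.enumerate nums 0).foldl
    (fun acc pv =>
      if PySem.Int.band ((2 : Int) ^ pv.1.toNat) bits ≠ 0 then
        (acc.1 + pv.2, acc.2.1 + (pv.1 + 1), acc.2.2 ++ [pv.2])
      else acc)
    ((0 : Int), (0 : Int), ([] : List Int))

def subset_equilibrium (nums : List Int) : List (List Int) :=
  (PySem.List.pyRange 1 ((2 : Int) ^ nums.length - 1)).foldl
    (fun results bits =>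
      if (pvInnerA nums bits).1 = (pvInnerA nums bits).2.1 ∧ 1 < (pvInnerA nums bits).2.2.length
      then results ++ [(pvInnerA nums bits).2.2]
      else results)
    []

-- ===== PORT B =====
-- `gen(pos, rest)` of Source B: triples (cons-chain, diff, size) for all subsets of `rest`
-- (element i of rest sits at index pos+i), in ascending-bitmask order; the chain is the
-- subset as a shared cons list, exactly Source B's nested (x, chain) tuples.
def pvGen (pos : Int) (rest : List Int) : List (List Int × Int × Int) :=
  match rest with
  | [] => [([], 0, 0)]
  | x :: rs =>
    (pvGen (pos + 1) rs).flatMap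
      (fun t => [t, (x :: t.1, t.2.1 + (x - (pos + 1)), t.2.2 + 1)])

-- the `while chain is not None: sub.append(chain[0])` materialisation loop of Source B
def pvMat (sub : List Int) (chain : List Int) : List Int :=
  match chain with
  | [] => sub
  | x :: r => pvMat (sub ++ [x]) r

def subset_equilibrium_alt (nums : List Int) : List (List Int) :=
  (pvGen 0 nums).foldl
    (fun results t =>
      if t.2.1 = 0 ∧ 1 < t.2.2 then results ++ [pvMat [] t.1] else results)
    []

-- ===== PRECONDITION & SPEC =====
-- On lists of length > 1 whose element sum equals 1+2+…+n (the full set qualifies), A omits the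
-- full list — its range stops at 2**n-2, an off-by-one — while B includes it as the last result,
-- which is the intended value for "all subsets".
def D_subset_equilibrium (nums : List Int) : Prop :=
  1 < nums.length ∧ 2 * nums.sum = (nums.length : Int) * ((nums.length : Int) + 1)
instance (nums : List Int) : Decidable (D_subset_equilibrium nums) := by
  unfold D_subset_equilibrium; infer_instance

def Spec_subset_equilibrium (nums : List Int) (out : List (List Int)) : Prop :=
  ¬ D_subset_equilibrium nums → out = subset_equilibrium_alt nums
instance (nums : List Int) (out : List (List Int)) : Decidable (Spec_subset_equilibrium nums out) := by
  unfold Spec_subset_equilibrium; infer_instance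

def pvDiffWitness_subset_equilibrium : List Int := [1, 2]
def pvDiffWitnessOut_subset_equilibrium : (List (List Int)) × (List (List Int)) := ([], [[1, 2]])

-- ===== CLAIM (what is proved, stated in full; the proofs are below) =====
def Claim_unchanged_subset_equilibrium : Prop := ∀ (nums : List Int), Dom_subset_equilibrium nums → Spec_subset_equilibrium nums (subset_equilibrium nums)
def Claim_changed_subset_equilibrium : Prop := Dom_subset_equilibrium (pvDiffWitness_subset_equilibrium) ∧ D_subset_equilibrium (pvDiffWitness_subset_equilibrium) ∧ subset_equilibrium (pvDiffWitness_subset_equilibrium) = pvDiffWitnessOut_subset_equilibrium.1 ∧ subset_equilibrium_alt (pvDiffWitness_subset_equilibrium) = pvDiffWitnessOut_subset_equilibrium.2 ∧ pvDiffWitnessOut_subset_equilibrium.1 ≠ pvDiffWitnessOut_subset_equilibrium.2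
def Claim_exact_subset_equilibrium : Prop := ∀ (nums : List Int), Dom_subset_equilibrium nums → D_subset_equilibrium nums → subset_equilibrium nums ≠ subset_equilibrium_alt nums

-- ===== LEMMAS AND PROOFS =====

theorem pvMat_eq (chain sub : List Int) : pvMat sub chain = sub ++ chain := by
  induction chain generalizing sub with
  | nil => simp [pvMat]
  | cons x r ih => simp [pvMat, ih]

-- selection by bitmask, B-shaped: (subset, diff, size); head of the list is bit 0 of m
def pvSel (m : Nat) (pos : Int) : List Int → List Int × Int × Int
  | [] => ([], 0, 0)
  | x :: xs =>
    let t := pvSel (m / 2) (pos + 1) xs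
    if m % 2 = 1 then (x :: t.1, t.2.1 + (x - (pos + 1)), t.2.2 + 1) else t

-- selection by bitmask, A-shaped: (digit_sum, pos_sum, result); nums[pos] tests bit pos of m
def pvSelA (m : Nat) (pos : Nat) : List Int → Int × Int × List Int
  | [] => (0, 0, [])
  | x :: xs =>
    let t := pvSelA m (pos + 1) xs
    if m.testBit pos then (x + t.1, ((pos : Int) + 1) + t.2.1, x :: t.2.2) else t

theorem range_two_mul_flatMap (N : Nat) :
    List.range (2 * N) = (List.range N).flatMap (fun h => [2 * h, 2 * h + 1]) := by
  induction N with
  | zero => rfl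
  | succ n ih =>
    have : 2 * (n + 1) = (2 * n + 1) + 1 := by omega
    rw [this, List.range_succ, List.range_succ, List.range_succ, ih]
    simp

theorem pvSel_two_mul (h : Nat) (pos : Int) (x : Int) (xs : List Int) :
    pvSel (2 * h) pos (x :: xs) = pvSel h (pos + 1) xs := by
  simp [pvSel, Nat.mul_mod_right]

theorem pvSel_two_mul_add_one (h : Nat) (pos : Int) (x : Int) (xs : List Int) :
    pvSel (2 * h + 1) pos (x :: xs) =
      ((x :: (pvSel h (pos + 1) xs).1,
        (pvSel h (pos + 1) xs).2.1 + (x - (pos + 1)),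
        (pvSel h (pos + 1) xs).2.2 + 1)) := by
  have h1 : (2 * h + 1) % 2 = 1 := by omega
  have h2 : (2 * h + 1) / 2 = h := by omega
  simp [pvSel, h1, h2]

theorem pvGen_eq (xs : List Int) (pos : Int) :
    pvGen pos xs = (List.range (2 ^ xs.length)).map (fun m => pvSel m pos xs) := by
  induction xs generalizing pos with
  | nil => simp [pvGen, pvSel]
  | cons x rs ih =>
    rw [pvGen, ih]
    have h2 : 2 ^ (x :: rs).length = 2 * 2 ^ rs.length := by
      simp [List.length_cons, pow_succ]; ring
    rw [h2, range_two_mul_flatMap]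
    rw [List.flatMap_map, List.map_flatMap]
    refine List.flatMap_congr (fun h _ => ?_)
    simp [pvSel_two_mul, pvSel_two_mul_add_one]

theorem innerA_eq (xs : List Int) (m : Nat) (pos0 : Nat) (acc : Int × Int × List Int) :
    (PySem.List.enumerate xs (pos0 : Int)).foldl
      (fun acc pv =>
        if PySem.Int.band ((2 : Int) ^ pv.1.toNat) (m : Int) ≠ 0 then
          (acc.1 + pv.2, acc.2.1 + (pv.1 + 1), acc.2.2 ++ [pv.2])
        else acc) acc
    = (acc.1 + (pvSelA m pos0 xs).1, acc.2.1 + (pvSelA m pos0 xs).2.1,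
       acc.2.2 ++ (pvSelA m pos0 xs).2.2) := by
  induction xs generalizing pos0 acc with
  | nil => simp [PySem.List.enumerate_nil, pvSelA]
  | cons x xs ih =>
    rw [PySem.List.enumerate_cons, List.foldl_cons]
    have hbt : (PySem.Int.band ((2 : Int) ^ ((pos0 : Int)).toNat) (m : Int) ≠ 0)
        ↔ m.testBit pos0 = true := by
      rw [Int.toNat_natCast]
      have h2 : (2 : Int) ^ pos0 = ((2 ^ pos0 : Nat) : Int) := by push_cast; ring
      rw [h2, PySem.Int.band_natCast, Nat.and_comm, Nat.and_two_pow]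
      cases hb : m.testBit pos0 <;> simp [hb, (Nat.two_pow_pos pos0).ne']
    have hcast : (pos0 : Int) + 1 = ((pos0 + 1 : Nat) : Int) := by push_cast; ring
    by_cases hb : m.testBit pos0 = true
    · rw [if_pos (by simpa using hbt.mpr hb)]
      rw [hcast, ih]
      rw [pvSelA]
      simp only [hb, if_pos]
      refine Prod.ext ?_ (Prod.ext ?_ ?_) <;> simp <;> ring
    · rw [if_neg (by simpa [hb] using (fun hc => hb (hbt.mp hc)))]
      rw [hcast, ih]
      rw [pvSelA]
      simp only [hb, if_neg, Bool.false_eq_true, not_false_eq_true]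

theorem bridge (xs : List Int) (m : Nat) (pos : Nat) :
    pvSel (m >>> pos) (pos : Int) xs =
      ((pvSelA m pos xs).2.2, (pvSelA m pos xs).1 - (pvSelA m pos xs).2.1,
       ((pvSelA m pos xs).2.2.length : Int)) := by
  induction xs generalizing pos with
  | nil => rfl
  | cons x xs ih =>
    have hbit : ((m >>> pos) % 2 = 1) ↔ m.testBit pos = true := by
      rw [Nat.testBit, Nat.and_comm, Nat.and_one_is_mod]
      rcases Nat.mod_two_eq_zero_or_one (m >>> pos) with h | h <;> simp [h]
    have hdiv : (m >>> pos) / 2 = m >>> (pos + 1) := (Nat.shiftRight_succ m pos).symm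
    have hcast : (pos : Int) + 1 = ((pos + 1 : Nat) : Int) := by push_cast; ring
    rw [pvSel, pvSelA]
    by_cases hb : m.testBit pos = true
    · simp only [hb, if_pos, hbit, hdiv, hcast, ih]
      refine Prod.ext ?_ (Prod.ext ?_ ?_) <;> simp <;> ring
    · simp only [hb, hbit, hdiv, hcast, ih, if_neg, Bool.false_eq_true, not_false_eq_true]

def pvPS (pos : Nat) : Nat → Int
  | 0 => 0
  | len + 1 => ((pos : Int) + 1) + pvPS (pos + 1) len

theorem two_mul_pvPS (len pos : Nat) :
    2 * pvPS pos len = (len : Int) * (2 * (pos : Int) + (len : Int) + 1) := by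
  induction len generalizing pos with
  | zero => simp [pvPS]
  | succ n ih =>
    rw [pvPS, mul_add, ih]
    push_cast
    ring

theorem pvSelA_zero (xs : List Int) (pos : Nat) : pvSelA 0 pos xs = (0, 0, []) := by
  induction xs generalizing pos with
  | nil => rfl
  | cons x rs ih => simp [pvSelA, ih]

theorem pvSelA_full (xs : List Int) (m : Nat) (pos : Nat)
    (h : ∀ i, pos ≤ i → i < pos + xs.length → m.testBit i = true) :
    pvSelA m pos xs = (xs.sum, pvPS pos xs.length, xs) := by
  induction xs generalizing pos with
  | nil => rfl
  | cons x rs ih =>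
    have hb : m.testBit pos = true := h pos le_rfl (by simp)
    rw [pvSelA]
    simp only [hb, if_pos]
    rw [ih (pos + 1) (fun i h1 h2 => h i (by omega) (by simp at h2 ⊢; omega))]
    simp [pvPS, List.sum_cons]

-- the common match predicate, stated on the A-shaped selection
def pvQ (nums : List Int) (m : Nat) : Bool :=
  decide ((pvSelA m 0 nums).1 = (pvSelA m 0 nums).2.1 ∧ 1 < (pvSelA m 0 nums).2.2.length)

theorem pvInnerA_cast (nums : List Int) (m : Nat) :
    pvInnerA nums (m : Int) = pvSelA m 0 nums := by
  unfold pvInnerA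
  simpa using innerA_eq nums m 0 (0, 0, [])

theorem pvSel_zero_cast (nums : List Int) (m : Nat) :
    pvSel m 0 nums =
      ((pvSelA m 0 nums).2.2, (pvSelA m 0 nums).1 - (pvSelA m 0 nums).2.1,
       ((pvSelA m 0 nums).2.2.length : Int)) := by
  have := bridge nums m 0
  simpa using this

theorem pyRange_one_natCast (N : Nat) :
    PySem.List.pyRange 1 ((N : Int) + 1) = (List.range N).map (fun k => ((k + 1 : Nat) : Int)) := by
  induction N with
  | zero =>
    have h : ((0 : Nat) : Int) + 1 = 1 := by norm_num
    rw [h]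
    decide
  | succ n ih =>
    have hc : ((n + 1 : Nat) : Int) + 1 = ((n : Int) + 1) + 1 := by push_cast; ring
    rw [hc, PySem.List.pyRange_one_succ_right (by push_cast; omega), ih, List.range_succ]
    simp

theorem B_canon (nums : List Int) :
    subset_equilibrium_alt nums =
      ((List.range (2 ^ nums.length)).filter (fun m => pvQ nums m)).map
        (fun m => (pvSelA m 0 nums).2.2) := by
  unfold subset_equilibrium_alt
  rw [PySem.List.foldl_append_ite (p := fun t : List Int × Int × Int => t.2.1 = 0 ∧ 1 < t.2.2)
        (f := fun t : List Int × Int × Int => pvMat [] t.1)]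
  rw [pvGen_eq, List.filter_map, List.map_map, List.nil_append]
  rw [List.filter_congr (q := fun m => pvQ nums m)
        (fun m _ => by
          simp only [Function.comp, pvSel_zero_cast, pvQ, decide_eq_decide]
          constructor
          · rintro ⟨h1, h2⟩; exact ⟨by omega, by exact_mod_cast h2⟩
          · rintro ⟨h1, h2⟩; exact ⟨by omega, by exact_mod_cast h2⟩)]
  apply List.map_congr_left
  intro m _
  simp [pvSel_zero_cast, pvMat_eq]

theorem A_canon (nums : List Int) (N : Nat) (h : (2 : Int) ^ nums.length - 1 = (N : Int) + 1) :
    subset_equilibrium nums =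
      ((List.range N).filter (fun k => pvQ nums (k + 1))).map
        (fun k => (pvSelA (k + 1) 0 nums).2.2) := by
  unfold subset_equilibrium
  rw [PySem.List.foldl_append_ite
        (p := fun bits => (pvInnerA nums bits).1 = (pvInnerA nums bits).2.1 ∧
                          1 < (pvInnerA nums bits).2.2.length)
        (f := fun bits => (pvInnerA nums bits).2.2)]
  rw [h, pyRange_one_natCast, List.filter_map, List.map_map, List.nil_append]
  rw [List.filter_congr (q := fun k => pvQ nums (k + 1))
        (fun k _ => by
          simp only [Function.comp_apply, pvInnerA_cast, pvQ])]
  apply List.map_congr_left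
  intro k _
  simp only [Function.comp_apply, pvInnerA_cast]

theorem pvQ_full (nums : List Int) (h1 : 1 ≤ nums.length) :
    (pvQ nums (2 ^ nums.length - 1) = true ↔ D_subset_equilibrium nums) ∧
    (pvSelA (2 ^ nums.length - 1) 0 nums).2.2 = nums := by
  have hfull : pvSelA (2 ^ nums.length - 1) 0 nums = (nums.sum, pvPS 0 nums.length, nums) := by
    apply pvSelA_full
    intro i _ hi
    rw [Nat.testBit_two_pow_sub_one]
    simp at hi ⊢
    omega
  refine ⟨?_, by rw [hfull]⟩
  rw [pvQ, hfull, D_subset_equilibrium, decide_eq_true_eq]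
  dsimp only
  have hps : 2 * pvPS 0 nums.length = (nums.length : Int) * ((nums.length : Int) + 1) := by
    have h := two_mul_pvPS nums.length 0
    push_cast at h
    linarith
  constructor
  · rintro ⟨h2, h3⟩
    exact ⟨h3, by rw [h2]; exact hps⟩
  · rintro ⟨h3, h2⟩
    exact ⟨by linarith, h3⟩

theorem pvQ_zero (nums : List Int) : pvQ nums 0 = false := by
  rw [pvQ, pvSelA_zero]
  simp

-- B = A ++ (the full list, if it qualifies)
theorem key_lemma (nums : List Int) :
    subset_equilibrium_alt nums =
      subset_equilibrium nums ++ (if D_subset_equilibrium nums then [nums] else []) := by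
  rcases nums with _ | ⟨x, xs⟩
  · decide
  set nums := x :: xs with hn
  have hL : 1 ≤ nums.length := by simp [hn]
  set N : Nat := 2 ^ nums.length - 2 with hN
  have h2 : 2 ≤ 2 ^ nums.length := by
    calc 2 = 2 ^ 1 := by norm_num
    _ ≤ 2 ^ nums.length := Nat.pow_le_pow_right (by norm_num) hL
  have hA : (2 : Int) ^ nums.length - 1 = (N : Int) + 1 := by
    have : ((N : Nat) : Int) = ((2 ^ nums.length : Nat) : Int) - 2 := by
      rw [hN]; push_cast [Nat.cast_sub h2]; ring
    rw [this]; push_cast; ring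
  have hsplit : List.range (2 ^ nums.length) =
      (0 :: (List.range N).map (fun k => k + 1)) ++ [2 ^ nums.length - 1] := by
    have e1 : 2 ^ nums.length = (N + 1) + 1 := by omega
    rw [e1, List.range_succ, List.range_succ_eq_map]
    have e2 : N + 1 = 2 ^ nums.length - 1 := by omega
    simp [Nat.succ_eq_add_one, e2]
  rw [B_canon, A_canon nums N hA, hsplit]
  rw [List.filter_append, List.map_append]
  congr 1
  · rw [List.filter_cons, pvQ_zero]
    simp only [Bool.false_eq_true, reduceIte]
    rw [List.filter_map, List.map_map]
    rfl
  · rcases pvQ_full nums hL with ⟨hiff, hval⟩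
    by_cases hD : D_subset_equilibrium nums
    · have hq : pvQ nums (2 ^ nums.length - 1) = true := hiff.mpr hD
      rw [if_pos hD]
      simp [hq, hval]
    · have hq : pvQ nums (2 ^ nums.length - 1) = false := by
        cases h : pvQ nums (2 ^ nums.length - 1)
        · rfl
        · exact absurd (hiff.mp h) hD
      rw [if_neg hD]
      simp [hq]

-- ===== VERDICT (by name: the statement is the Claim_ definition above) =====
theorem subset_equilibrium_spec : Claim_unchanged_subset_equilibrium := by
  intro nums _ hD
  rw [key_lemma nums, if_neg hD, List.append_nil]

theorem subset_equilibrium_changed : Claim_changed_subset_equilibrium := by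
  unfold Claim_changed_subset_equilibrium; decide

theorem subset_equilibrium_tight : Claim_exact_subset_equilibrium := by
  intro nums _ hD h
  have := key_lemma nums
  rw [if_pos hD, ← h] at this
  have hlen := congrArg List.length this
  simp at hlen
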